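-- pv_equiv track=rewrite | github.com/mattvision/arm | interface/logPanel.py | parseRunlevelRanges
-- ===== SOURCE A (Python) =====
-- def parseRunlevelRanges(eventsList, searchPrefix):
--   """
--   This parses a list of events to provide an ordered list of runlevels,
--   condensed if three or more are in a contiguous range. This removes parsed
--   runlevels from the eventsList. For instance:
--
--   eventsList = ["BW", "ARM_WARN", "ERR", "ARM_ERR", "ARM_DEBUG", "ARM_NOTICE"]
--   searchPrefix = "ARM_"
--
--   results in:
--   eventsList = ["BW", "ERR"]
--   return value is ["DEBUG", "NOTICE - ERR"]
--
--   """
--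
--   # blank ending runlevel forces the break condition to be reached at the end
--   runlevels = ["DEBUG", "INFO", "NOTICE", "WARN", "ERR", ""]
--   runlevelLabels = []
--   start, end = "", ""
--   rangeLength = 0
--
--   for level in runlevels:
--     if searchPrefix + level in eventsList:
--       eventsList.remove(searchPrefix + level)
--
--       if start:
--         end = level
--         rangeLength += 1
--       else:
--         start = level
--         rangeLength = 1
--     elif rangeLength > 0:
--       # reached a break in the runlevels
--       if rangeLength == 1: runlevelLabels += [start]
--       elif rangeLength == 2: runlevelLabels += [start, end]
--       else: runlevelLabels += ["%s - %s" % (start, end)]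
--
--       start, end = "", ""
--       rangeLength = 0
--
--   return runlevelLabels
-- ===== SOURCE B (Python) =====
-- def parseRunlevelRanges(eventsList, searchPrefix):
--   """
--   Returns ordered runlevel labels, condensing contiguous runs of three or
--   more into "start - end"; removes the parsed runlevel events from eventsList.
--   (Return-value re-implementation of A; A additionally removes a bare
--   searchPrefix match via its sentinel empty runlevel, B does not.)
--   """
--   runlevels = ["DEBUG", "INFO", "NOTICE", "WARN", "ERR"]
--   present = []
--   for i, level in enumerate(runlevels):
--     key = searchPrefix + level
--     if key in eventsList:
--       eventsList.remove(key)
--       present.append(i)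
--   labels = []
--   for k, i in enumerate(present):
--     if k > 0 and present[k - 1] == i - 1:
--       continue  # not the start of a run
--     j = i
--     while j + 1 in present:
--       j += 1
--     if j == i:
--       labels.append(runlevels[i])
--     elif j == i + 1:
--       labels += [runlevels[i], runlevels[j]]
--     else:
--       labels.append("%s - %s" % (runlevels[i], runlevels[j]))
--   return labels
-- ===== Notes on version B (the rewrite author's own statement) =====
-- stated objective: alternative
-- what changed: Replaces A's single sentinel-driven state machine (start/end/rangeLength with a blank runlevel forcing the final flush) by a two-pass scan: pass one collects the indices of present runlevels (removing matched events), pass two finds maximal contiguous index runs and emits each run's label.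
-- intended difference: When eventsList contains both the bare searchPrefix and searchPrefix+'ERR', A's sentinel empty runlevel absorbs the bare prefix and A silently drops the label(s) of the final run (e.g. A returns [] on (['ARM_ERR','ARM_'],'ARM_')), while B returns that run's label (['ERR']); B's value is intended since the bare prefix names no runlevel. — e.g. on parseRunlevelRanges(["ARM_ERR", "ARM_"], "ARM_"): A returns [], B returns ["ERR"]
import Mathlib
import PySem

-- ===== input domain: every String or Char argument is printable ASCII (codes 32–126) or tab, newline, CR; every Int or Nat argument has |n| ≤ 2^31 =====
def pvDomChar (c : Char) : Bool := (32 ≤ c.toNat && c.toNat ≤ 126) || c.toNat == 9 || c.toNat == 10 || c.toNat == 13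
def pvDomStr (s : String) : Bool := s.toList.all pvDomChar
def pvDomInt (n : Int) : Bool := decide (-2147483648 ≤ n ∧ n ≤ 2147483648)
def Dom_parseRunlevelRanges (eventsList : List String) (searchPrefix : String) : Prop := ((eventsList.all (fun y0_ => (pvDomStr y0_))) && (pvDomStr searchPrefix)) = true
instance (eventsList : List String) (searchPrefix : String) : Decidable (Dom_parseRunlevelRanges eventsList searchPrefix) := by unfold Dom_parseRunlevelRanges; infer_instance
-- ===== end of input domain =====

-- B condenses runlevels with a presence/index two-pass scan instead of A's sentinel-driven state
-- machine; equivalence is about the RETURN value only (both mutate eventsList in Python; A also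
-- removes a bare searchPrefix match, B does not).

-- ===== PORT A =====
-- the body of A's for-loop, carrying (eventsList, runlevelLabels, start, end, rangeLength)
def pvStepA (searchPrefix : String)
    (s : List String × List String × String × String × Nat) (level : String) :
    List String × List String × String × String × Nat :=
  let events := s.1
  let labels := s.2.1
  let start := s.2.2.1
  let endv := s.2.2.2.1
  let rangeLength := s.2.2.2.2
  if searchPrefix ++ level ∈ events then
    -- eventsList.remove(...): the element is present, so remove? is some (first occurrence erased)
    let events' := (PySem.List.remove? events (searchPrefix ++ level)).getD events
    if start ≠ "" then (events', labels, start, level, rangeLength + 1)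
    else (events', labels, level, endv, 1)
  else if rangeLength > 0 then
    let labels' :=
      if rangeLength = 1 then labels ++ [start]
      else if rangeLength = 2 then labels ++ [start, endv]
      else labels ++ [start ++ " - " ++ endv]
    (events, labels', "", "", 0)
  else s

def parseRunlevelRanges (eventsList : List String) (searchPrefix : String) : List String :=
  let runlevels : List String := ["DEBUG", "INFO", "NOTICE", "WARN", "ERR", ""]
  (runlevels.foldl (pvStepA searchPrefix) (eventsList, [], "", "", 0)).2.1

-- ===== PORT B =====
def pvRunlevels : List String := ["DEBUG", "INFO", "NOTICE", "WARN", "ERR"]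

-- the body of Source B's first loop: remove a matched event, record the present index
def pvStepB (searchPrefix : String) (s : List String × List Int) (p : Int × String) :
    List String × List Int :=
  if searchPrefix ++ p.2 ∈ s.1 then
    ((PySem.List.remove? s.1 (searchPrefix ++ p.2)).getD s.1, s.2 ++ [p.1])
  else s

-- Source B's 'while j + 1 in present: j += 1'; fuel 6 is exact since present only holds indices 0..4
def pvExtendRun (present : List Int) (j : Int) : Nat → Int
  | 0 => j
  | fuel + 1 => if (j + 1) ∈ present then pvExtendRun present (j + 1) fuel else j

-- the body of Source B's second loop: skip non-starts, else emit the label of the run from p.2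
def pvEmit (present : List Int) (labels : List String) (p : Int × Int) : List String :=
  if p.1 > 0 ∧ PySem.List.pyGetD present (p.1 - 1) 0 = p.2 - 1 then labels
  else
    let i := p.2
    let j := pvExtendRun present i 6
    if j = i then labels ++ [PySem.List.pyGetD pvRunlevels i ""]
    else if j = i + 1 then
      labels ++ [PySem.List.pyGetD pvRunlevels i "", PySem.List.pyGetD pvRunlevels j ""]
    else
      labels ++ [PySem.List.pyGetD pvRunlevels i "" ++ " - " ++ PySem.List.pyGetD pvRunlevels j ""]

def parseRunlevelRanges_alt (eventsList : List String) (searchPrefix : String) : List String :=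
  let present := ((PySem.List.enumerate pvRunlevels).foldl (pvStepB searchPrefix)
    (eventsList, [])).2
  (PySem.List.enumerate present).foldl (pvEmit present) []

-- ===== PRECONDITION & SPEC =====
-- When eventsList contains both the bare searchPrefix (matched by A's sentinel empty runlevel) and
-- searchPrefix+"ERR", A silently drops the label(s) of the final run of runlevels, while B reports
-- that run; B's value is the intended one since the bare prefix names no runlevel.
def D_parseRunlevelRanges (eventsList : List String) (searchPrefix : String) : Prop :=
  searchPrefix ∈ eventsList ∧ searchPrefix ++ "ERR" ∈ eventsList
instance (eventsList : List String) (searchPrefix : String) : Decidable (D_parseRunlevelRanges eventsList searchPrefix) := by unfold D_parseRunlevelRanges; infer_instance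

def Spec_parseRunlevelRanges (eventsList : List String) (searchPrefix : String) (out : List String) : Prop := ¬ D_parseRunlevelRanges eventsList searchPrefix → out = parseRunlevelRanges_alt eventsList searchPrefix
instance (eventsList : List String) (searchPrefix : String) (out : List String) : Decidable (Spec_parseRunlevelRanges eventsList searchPrefix out) := by unfold Spec_parseRunlevelRanges; infer_instance

def pvDiffWitness_parseRunlevelRanges : List String × String := (["ARM_ERR", "ARM_"], "ARM_")
def pvDiffWitnessOut_parseRunlevelRanges : (List String) × (List String) := ([], ["ERR"])

-- ===== CLAIM (what is proved, stated in full; the proofs are below) =====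
def Claim_unchanged_parseRunlevelRanges : Prop := ∀ (eventsList : List String) (searchPrefix : String), Dom_parseRunlevelRanges eventsList searchPrefix → Spec_parseRunlevelRanges eventsList searchPrefix (parseRunlevelRanges eventsList searchPrefix)
def Claim_changed_parseRunlevelRanges : Prop := Dom_parseRunlevelRanges (pvDiffWitness_parseRunlevelRanges.1) (pvDiffWitness_parseRunlevelRanges.2) ∧ D_parseRunlevelRanges (pvDiffWitness_parseRunlevelRanges.1) (pvDiffWitness_parseRunlevelRanges.2) ∧ parseRunlevelRanges (pvDiffWitness_parseRunlevelRanges.1) (pvDiffWitness_parseRunlevelRanges.2) = pvDiffWitnessOut_parseRunlevelRanges.1 ∧ parseRunlevelRanges_alt (pvDiffWitness_parseRunlevelRanges.1) (pvDiffWitness_parseRunlevelRanges.2) = pvDiffWitnessOut_parseRunlevelRanges.2 ∧ pvDiffWitnessOut_parseRunlevelRanges.1 ≠ pvDiffWitnessOut_parseRunlevelRanges.2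
def Claim_exact_parseRunlevelRanges : Prop := ∀ (eventsList : List String) (searchPrefix : String), Dom_parseRunlevelRanges eventsList searchPrefix → D_parseRunlevelRanges eventsList searchPrefix → parseRunlevelRanges eventsList searchPrefix ≠ parseRunlevelRanges_alt eventsList searchPrefix

-- ===== LEMMAS AND PROOFS =====

-- removing one key leaves membership of a DIFFERENT key unchanged
theorem pv_mem_removeGetD (l : List String) (a b : String) (hab : a ≠ b) :
    (a ∈ (PySem.List.remove? l b).getD l) ↔ a ∈ l := by
  by_cases h : b ∈ l
  · rw [PySem.List.remove?_eq_some_erase _ _ h]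
    simpa using List.mem_erase_of_ne hab
  · rw [(PySem.List.remove?_eq_none_iff l b).2 h]
    simp

-- string append is left-cancellative (keys built from distinct levels are distinct)
theorem pv_append_cancel_iff (p a b : String) : (p ++ a = p ++ b) ↔ a = b := by
  constructor
  · intro he
    have h2 := congrArg String.toList he
    simp only [String.toList_append] at h2
    exact String.toList_injective (List.append_cancel_left h2)
  · intro h; rw [h]

theorem pv_append_empty (s : String) : s ++ "" = s := by
  apply String.toList_injective
  simp

-- events-free simulation of A's loop: the same state machine driven by presence flags
def pvSimA : List (String × Bool) → List String × String × String × Nat → List String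
  | [], acc => acc.1
  | (level, b) :: rest, (labels, start, endv, rangeLength) =>
    if b then
      if start ≠ "" then pvSimA rest (labels, start, level, rangeLength + 1)
      else pvSimA rest (labels, level, endv, 1)
    else if rangeLength > 0 then
      pvSimA rest
        ((if rangeLength = 1 then labels ++ [start]
          else if rangeLength = 2 then labels ++ [start, endv]
          else labels ++ [start ++ " - " ++ endv]), "", "", 0)
    else pvSimA rest (labels, start, endv, rangeLength)

theorem pv_foldA_eq (pfx : String) (levels : List String) (hlv : levels.Pairwise (· ≠ ·)) :
    ∀ (L : List String) (labels : List String) (start endv : String) (len : Nat),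
      (levels.foldl (pvStepA pfx) (L, labels, start, endv, len)).2.1
        = pvSimA (levels.map (fun l => (l, decide ((pfx ++ l) ∈ L)))) (labels, start, endv, len) := by
  induction levels with
  | nil => intro L labels start endv len; rfl
  | cons l ls ih =>
    intro L labels start endv len
    have hne : ∀ l' ∈ ls, l ≠ l' := (List.pairwise_cons.1 hlv).1
    have htl : ls.Pairwise (· ≠ ·) := (List.pairwise_cons.1 hlv).2
    by_cases hm : (pfx ++ l) ∈ L
    · have hmapeq : ls.map (fun l' => (l', decide ((pfx ++ l') ∈ (PySem.List.remove? L (pfx ++ l)).getD L)))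
          = ls.map (fun l' => (l', decide ((pfx ++ l') ∈ L))) := by
        apply List.map_congr_left
        intro l' hl'
        have hk : (pfx ++ l') ≠ (pfx ++ l) := fun he => (hne l' hl') ((pv_append_cancel_iff pfx l' l).1 he).symm
        simp [pv_mem_removeGetD L (pfx ++ l') (pfx ++ l) hk]
      by_cases hs : start = ""
      · simp [pvStepA, pvSimA, hm, hs, ih htl, hmapeq]
      · simp [pvStepA, pvSimA, hm, hs, ih htl, hmapeq]
    · by_cases hr : len > 0
      · simp [pvStepA, pvSimA, hm, hr, ih htl]
      · simp [pvStepA, pvSimA, hm, hr, ih htl]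

-- events-free simulation of B's first loop: the present indices are the flagged indices
theorem pv_foldB_eq (pfx : String) (ps : List (Int × String)) (hlv : ps.Pairwise (fun p q => p.2 ≠ q.2)) :
    ∀ (L : List String) (pres : List Int),
      (ps.foldl (pvStepB pfx) (L, pres)).2
        = pres ++ (ps.filter (fun p => decide ((pfx ++ p.2) ∈ L))).map (·.1) := by
  induction ps with
  | nil => intro L pres; simp
  | cons p ps ih =>
    intro L pres
    have hne : ∀ q ∈ ps, p.2 ≠ q.2 := (List.pairwise_cons.1 hlv).1
    have htl : ps.Pairwise (fun p q => p.2 ≠ q.2) := (List.pairwise_cons.1 hlv).2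
    by_cases hm : (pfx ++ p.2) ∈ L
    · have hfeq : ps.filter (fun q => decide ((pfx ++ q.2) ∈ (PySem.List.remove? L (pfx ++ p.2)).getD L))
          = ps.filter (fun q => decide ((pfx ++ q.2) ∈ L)) := by
        apply List.filter_congr
        intro q hq
        have hk : (pfx ++ q.2) ≠ (pfx ++ p.2) := fun he => (hne q hq) ((pv_append_cancel_iff pfx q.2 p.2).1 he).symm
        simp [pv_mem_removeGetD L (pfx ++ q.2) (pfx ++ p.2) hk]
      simp [pvStepB, hm, ih htl, hfeq]
    · simp [pvStepB, hm, ih htl]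

set_option maxHeartbeats 1000000 in
theorem pv_agree (eventsList : List String) (searchPrefix : String)
    (hD : ¬ D_parseRunlevelRanges eventsList searchPrefix) :
    parseRunlevelRanges eventsList searchPrefix = parseRunlevelRanges_alt eventsList searchPrefix := by
  unfold D_parseRunlevelRanges at hD
  simp only [parseRunlevelRanges, parseRunlevelRanges_alt]
  rw [pv_foldA_eq searchPrefix _ (by decide), pv_foldB_eq searchPrefix _ (by decide)]
  simp only [List.map_cons, List.map_nil, pvRunlevels, PySem.List.enumerate_cons,
    PySem.List.enumerate_nil, Int.reduceAdd, List.filter_cons, List.filter_nil,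
    List.nil_append, pv_append_empty]
  have hcon : ¬(decide (searchPrefix ∈ eventsList) = true
      ∧ decide ((searchPrefix ++ "ERR") ∈ eventsList) = true) := by simpa using hD
  generalize (decide ((searchPrefix ++ "DEBUG") ∈ eventsList)) = b0
  generalize (decide ((searchPrefix ++ "INFO") ∈ eventsList)) = b1
  generalize (decide ((searchPrefix ++ "NOTICE") ∈ eventsList)) = b2
  generalize (decide ((searchPrefix ++ "WARN") ∈ eventsList)) = b3
  generalize (decide ((searchPrefix ++ "ERR") ∈ eventsList)) = b4 at hcon ⊢
  generalize (decide (searchPrefix ∈ eventsList)) = b5 at hcon ⊢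
  clear hD
  revert hcon
  revert b0 b1 b2 b3 b4 b5
  decide

-- ===== VERDICT (by name: the statement is the Claim_ definition above) =====
theorem parseRunlevelRanges_spec : Claim_unchanged_parseRunlevelRanges := by
  intro ev pfx _ hD
  exact pv_agree ev pfx hD

set_option maxHeartbeats 1000000 in
theorem parseRunlevelRanges_changed : Claim_changed_parseRunlevelRanges := by
  unfold Claim_changed_parseRunlevelRanges; decide

set_option maxHeartbeats 1000000 in
theorem parseRunlevelRanges_tight : Claim_exact_parseRunlevelRanges := by
  intro eventsList searchPrefix _ hD
  unfold D_parseRunlevelRanges at hD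
  simp only [parseRunlevelRanges, parseRunlevelRanges_alt]
  rw [pv_foldA_eq searchPrefix _ (by decide), pv_foldB_eq searchPrefix _ (by decide)]
  simp only [List.map_cons, List.map_nil, pvRunlevels, PySem.List.enumerate_cons,
    PySem.List.enumerate_nil, Int.reduceAdd, List.filter_cons, List.filter_nil,
    List.nil_append, pv_append_empty]
  have hcon : decide (searchPrefix ∈ eventsList) = true
      ∧ decide ((searchPrefix ++ "ERR") ∈ eventsList) = true := by simpa using hD
  generalize (decide ((searchPrefix ++ "DEBUG") ∈ eventsList)) = b0
  generalize (decide ((searchPrefix ++ "INFO") ∈ eventsList)) = b1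
  generalize (decide ((searchPrefix ++ "NOTICE") ∈ eventsList)) = b2
  generalize (decide ((searchPrefix ++ "WARN") ∈ eventsList)) = b3
  generalize (decide ((searchPrefix ++ "ERR") ∈ eventsList)) = b4 at hcon ⊢
  generalize (decide (searchPrefix ∈ eventsList)) = b5 at hcon ⊢
  clear hD
  revert hcon
  revert b0 b1 b2 b3 b4 b5
  decide
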